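-- pv_equiv track=rewrite | github.com/zzzwjjj/zwj65309 | web/utils/class(2).py | binary_multiply
-- ===== SOURCE A (Python) =====
-- def binary_multiply(a: int, b: int) -> int:
--     """
--     Multiply 'a' and 'b' using bitwise multiplication.
--
--     Parameters:
--     a (int): The first number.
--     b (int): The second number.
--
--     Returns:
--     int: a * b
--
--     Examples:
--     >>> binary_multiply(2, 3)
--     6
--     >>> binary_multiply(5, 0)
--     0
--     >>> binary_multiply(3, 4)
--     12
--     >>> binary_multiply(10, 5)
--     50
--     >>> binary_multiply(0, 5)
--     0
--     >>> binary_multiply(2, 1)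
--     2
--     >>> binary_multiply(1, 10)
--     10
--     """
--     res = 0
--     while b > 0:
--         if b & 1:
--             res += a
--
--         a += a
--         b >>= 1
--
--     return res
-- ===== SOURCE B (Python) =====
-- def binary_multiply(a: int, b: int) -> int:
--     if b <= 0:
--         return 0
--     return (a if b & 1 else 0) + binary_multiply(a + a, b >> 1)
-- ===== Notes on version B (the rewrite author's own statement) =====
-- stated objective: alternative
-- what changed: Replaces the accumulating while-loop over (res, a, b) with a recursive Russian-peasant multiply that threads the doubling of a through recursion on the bits of b.
import Mathlib
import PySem

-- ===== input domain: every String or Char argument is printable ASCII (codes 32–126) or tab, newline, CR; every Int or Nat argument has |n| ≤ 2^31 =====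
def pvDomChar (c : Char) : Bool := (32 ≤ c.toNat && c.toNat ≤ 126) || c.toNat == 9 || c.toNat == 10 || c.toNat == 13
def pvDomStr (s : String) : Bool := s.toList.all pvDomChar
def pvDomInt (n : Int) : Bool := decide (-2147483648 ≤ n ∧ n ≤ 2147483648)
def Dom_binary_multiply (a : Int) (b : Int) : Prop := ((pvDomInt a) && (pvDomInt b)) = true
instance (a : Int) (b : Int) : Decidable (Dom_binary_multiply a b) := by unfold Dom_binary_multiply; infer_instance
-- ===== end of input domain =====

-- Program B replaces A's accumulating while-loop with a recursive Russian-peasant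
-- multiply; objective: alternative (same cost, different decomposition).


-- ===== PORT A =====
-- the while-loop of A, over the same state (res, a, b)
def binary_multiply_loop (a : Int) (b : Int) (res : Int) : Int :=
  if _h : b > 0 then
    binary_multiply_loop (a + a) (b >>> (1 : Nat)) (if b.land 1 ≠ 0 then res + a else res)
  else res
termination_by b.toNat
decreasing_by
  simp only [Int.shiftRight_eq_div_pow, pow_one]
  omega

def binary_multiply (a : Int) (b : Int) : Int := binary_multiply_loop a b 0

-- ===== PORT B =====
def binary_multiply_alt (a : Int) (b : Int) : Int :=
  if _h : b ≤ 0 then 0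
  else (if b.land 1 ≠ 0 then a else 0) + binary_multiply_alt (a + a) (b >>> (1 : Nat))
termination_by b.toNat
decreasing_by
  simp only [Int.shiftRight_eq_div_pow, pow_one]
  omega

-- ===== PRECONDITION & SPEC =====
def Spec_binary_multiply (a : Int) (b : Int) (out : Int) : Prop := out = binary_multiply_alt a b
instance (a : Int) (b : Int) (out : Int) : Decidable (Spec_binary_multiply a b out) := by unfold Spec_binary_multiply; infer_instance

-- ===== CLAIM (what is proved, stated in full; the proofs are below) =====
def Claim_equal_binary_multiply : Prop := ∀ (a : Int) (b : Int), Dom_binary_multiply a b → Spec_binary_multiply a b (binary_multiply a b)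

-- ===== LEMMAS AND PROOFS =====

-- loop invariant: A's loop equals res plus B's recursive value
theorem binary_multiply_loop_eq (n : Nat) :
    ∀ (a b res : Int), b.toNat ≤ n →
      binary_multiply_loop a b res = res + binary_multiply_alt a b := by
  induction n with
  | zero =>
      intro a b res hb
      rw [binary_multiply_loop, binary_multiply_alt]
      have hb' : b ≤ 0 := by omega
      simp [hb', not_lt.mpr hb']
  | succ n ih =>
      intro a b res hb
      rw [binary_multiply_loop, binary_multiply_alt]
      by_cases hpos : b > 0
      · have hle : ¬ b ≤ 0 := by omega
        have hdec : ((b >>> (1 : Nat)).toNat ≤ n) := by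
          have := Int.shiftRight_eq_div_pow b 1
          simp only [this, pow_one]
          omega
        rw [dif_pos hpos, dif_neg hle, ih _ _ _ hdec]
        by_cases hbit : b.land 1 ≠ 0 <;> simp [hbit] <;> ring
      · have hle : b ≤ 0 := by omega
        rw [dif_neg hpos, dif_pos hle]
        ring

-- ===== VERDICT (by name: the statement is the Claim_ definition above) =====
theorem binary_multiply_spec : Claim_equal_binary_multiply := by
  intro a b _
  unfold Spec_binary_multiply binary_multiply
  simpa using binary_multiply_loop_eq b.toNat a b 0 le_rfl
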